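-- pv_equiv track=rewrite | github.com/simhadri0674/codemind-python | count_words.py | count
-- ===== SOURCE A (Python) =====
-- def count(a):
--     c=0
--     d=[]
--     for i in a:
--         d.append(i)
--     for j in d:
--         if (d[0] in "aeiouAEIOU ") and (d[-1] not in 'aeiouAEIOU'):
--             c+=1
--     return c
-- ===== SOURCE B (Python) =====
-- def count(a):
--     if a and a[0] in "aeiouAEIOU " and a[-1] not in "aeiouAEIOU":
--         return len(a)
--     return 0
-- ===== Notes on version B (the rewrite author's own statement) =====
-- stated objective: faster
-- what changed: B replaces A's list copy and per-character loop (whose condition only looks at the fixed first/last chars) with a single closed-form check returning len(a) or 0.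
import Mathlib
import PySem

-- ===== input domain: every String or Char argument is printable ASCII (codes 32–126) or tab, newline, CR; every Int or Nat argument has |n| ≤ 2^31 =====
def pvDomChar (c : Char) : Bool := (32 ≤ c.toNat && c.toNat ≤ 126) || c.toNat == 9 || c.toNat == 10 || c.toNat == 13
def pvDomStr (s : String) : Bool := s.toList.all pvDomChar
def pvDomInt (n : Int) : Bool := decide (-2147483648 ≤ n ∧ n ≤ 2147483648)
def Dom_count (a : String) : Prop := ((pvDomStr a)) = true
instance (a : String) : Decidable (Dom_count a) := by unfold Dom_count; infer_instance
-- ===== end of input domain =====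

-- ===== PORT A =====
-- literal port: copy a's chars into d, then fold over d incrementing c when the
-- (constant) first/last-character condition holds
def vowelsSp : List Char := "aeiouAEIOU ".toList
def vowels : List Char := "aeiouAEIOU".toList

def count (a : String) : Int :=
  let d : List Char := a.toList.foldl (fun acc i => acc ++ [i]) []
  d.foldl (fun c _j =>
    match PySem.List.pyGet? d 0, PySem.List.pyGet? d (-1) with
    | some h, some l => if h ∈ vowelsSp ∧ l ∉ vowels then c + 1 else c
    | _, _ => c) 0

-- ===== PORT B =====
def count_alt (a : String) : Int :=
  match a.toList with
  | [] => 0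
  | h :: t =>
    if h ∈ vowelsSp ∧ (h :: t).getLast (by simp) ∉ vowels then (h :: t).length else 0
-- ===== PRECONDITION & SPEC =====
def Spec_count (a : String) (out : Int) : Prop := out = count_alt a
instance (a : String) (out : Int) : Decidable (Spec_count a out) := by unfold Spec_count; infer_instance

-- ===== CLAIM (what is proved, stated in full; the proofs are below) =====
def Claim_equal_count : Prop := ∀ (a : String), Dom_count a → Spec_count a (count a)

-- ===== LEMMAS AND PROOFS =====
lemma copy_id (l acc : List Char) : l.foldl (fun acc i => acc ++ [i]) acc = acc ++ l := by
  induction l generalizing acc with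
  | nil => simp
  | cons h t ih => simp [List.foldl, ih]

lemma foldl_const_if (P : Prop) [Decidable P] (l : List Char) (n : Int) :
    l.foldl (fun c _ => if P then c + 1 else c) n = if P then n + l.length else n := by
  induction l generalizing n with
  | nil => simp
  | cons h t ih =>
    simp only [List.foldl, ih]
    split_ifs with hp
    · simp [List.length_cons]; push_cast; ring
    · rfl

-- ===== VERDICT (by name: the statement is the Claim_ definition above) =====
theorem count_spec : Claim_equal_count := by
  intro a _
  unfold Spec_count count count_alt
  simp only [copy_id, List.nil_append]
  cases h : a.toList with
  | nil => simp
  | cons x t =>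
    rw [PySem.List.pyGet?_zero_cons, PySem.List.pyGet?_neg_one,
        List.getLast?_eq_some_getLast (by simp)]
    simp only [foldl_const_if]
    split_ifs <;> simp
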